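-- pv_equiv track=rewrite | github.com/kzsofia92/benchmark470handler | tmc470.py | _extract_status_bits
-- ===== SOURCE A (Python) =====
-- def _extract_status_bits(resp: str) -> str:
--     """
--     Java split: message = response.substring(16,24);
--     We replicate defensively: find an 8-char 0/1 sequence.
--     """
--     # Try exact window first if long enough
--     if len(resp) >= 24:
--         cand = resp[16:24]
--         if len(cand) == 8 and all(c in "01" for c in cand):
--             return cand
--     # Fallback: scan for 8-bit window
--     for i in range(len(resp) - 7):
--         chunk = resp[i:i+8]
--         if all(c in "01" for c in chunk):
--             return chunk
--     return ""
-- ===== SOURCE B (Python) =====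
-- def _extract_status_bits(resp: str) -> str:
--     # Exact-window priority as in the Java original: resp[16:24] if it is 8 bits.
--     if len(resp) >= 24 and all(c in "01" for c in resp[16:24]):
--         return resp[16:24]
--     # Staged fallback: split resp into maximal runs of 0/1 characters,
--     # then return the first 8 chars of the first run of length >= 8.
--     runs = []
--     cur = []
--     for c in resp:
--         if c in "01":
--             cur.append(c)
--         else:
--             runs.append(cur)
--             cur = []
--     runs.append(cur)
--     for run in runs:
--         if len(run) >= 8:
--             return "".join(run[:8])
--     return ""
-- ===== Notes on version B (the rewrite author's own statement) =====
-- stated objective: faster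
-- what changed: The fallback sliding-window scan (a fresh 8-char slice and full all() re-check at every start index) is replaced by two staged passes: first split resp into maximal runs of 0/1 characters, then return the first 8 chars of the first run of length >= 8; the exact resp[16:24] priority branch is kept.
import Mathlib
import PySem

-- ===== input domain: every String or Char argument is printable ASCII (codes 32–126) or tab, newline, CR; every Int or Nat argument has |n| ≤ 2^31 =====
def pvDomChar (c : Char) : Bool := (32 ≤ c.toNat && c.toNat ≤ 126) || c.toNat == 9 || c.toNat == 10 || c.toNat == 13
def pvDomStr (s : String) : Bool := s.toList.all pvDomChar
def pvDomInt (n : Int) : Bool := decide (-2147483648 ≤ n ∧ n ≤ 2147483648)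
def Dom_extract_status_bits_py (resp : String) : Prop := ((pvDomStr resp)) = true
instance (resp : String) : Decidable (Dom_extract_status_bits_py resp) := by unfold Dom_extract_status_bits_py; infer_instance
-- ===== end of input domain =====

-- B replaces A's per-index 8-char window re-checks with two staged passes: split into
-- maximal 0/1 runs, then take the first 8 chars of the first run of length >= 8.


-- ===== PORT A =====
-- `c in "01"` (shared by both Pythons)
def pvIsBit (c : Char) : Bool := c == '0' || c == '1'

-- A's fallback loop `for i in range(len(resp)-7): chunk = resp[i:i+8]; …`,
-- as structural recursion over the suffix starting at index i
-- (the loop runs exactly while the suffix still holds a full 8-char window).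
def pvLoopA : List Char → Option (List Char)
  | [] => none
  | c :: t =>
    if 8 ≤ (c :: t).length then
      let chunk := (c :: t).take 8
      if chunk.all pvIsBit then some chunk else pvLoopA t
    else none

def extract_status_bits_py (resp : String) : String :=
  let cs := resp.toList
  let exact? : Option (List Char) :=
    if 24 ≤ cs.length then
      let cand := PySem.List.slice cs (some 16) (some 24)
      if cand.length == 8 && cand.all pvIsBit then some cand else none
    else none
  match exact? with
  | some cand => String.ofList cand
  | none =>
    match pvLoopA cs with
    | some chunk => String.ofList chunk
    | none => ""

-- ===== PORT B =====
-- B's first pass: split into maximal runs of 0/1 chars (cur is the run in progress;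
-- Python closes it with `runs.append(cur)` on a non-bit char and once at the end).
def pvRuns : List Char → List Char → List (List Char)
  | [], cur => [cur]
  | c :: t, cur => if pvIsBit c then pvRuns t (cur ++ [c]) else cur :: pvRuns t []

-- B's second pass: first run of length >= 8 yields its first 8 chars.
def pvFirstLong : List (List Char) → Option (List Char)
  | [] => none
  | r :: rs => if 8 ≤ r.length then some (r.take 8) else pvFirstLong rs

def extract_status_bits_py_alt (resp : String) : String :=
  let cs := resp.toList
  if 24 ≤ cs.length ∧ (PySem.List.slice cs (some 16) (some 24)).all pvIsBit = true then
    String.ofList (PySem.List.slice cs (some 16) (some 24))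
  else
    match pvFirstLong (pvRuns cs []) with
    | some run => String.ofList run
    | none => ""

-- ===== PRECONDITION & SPEC =====
def Spec_extract_status_bits_py (resp : String) (out : String) : Prop := out = extract_status_bits_py_alt resp
instance (resp : String) (out : String) : Decidable (Spec_extract_status_bits_py resp out) := by unfold Spec_extract_status_bits_py; infer_instance

-- ===== CLAIM (what is proved, stated in full; the proofs are below) =====
def Claim_equal_extract_status_bits_py : Prop := ∀ (resp : String), Dom_extract_status_bits_py resp → Spec_extract_status_bits_py resp (extract_status_bits_py resp)

-- ===== LEMMAS AND PROOFS =====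

theorem pvLoopA_short {l : List Char} (h : l.length < 8) : pvLoopA l = none := by
  cases l with
  | nil => rfl
  | cons c t =>
    rw [pvLoopA, if_neg]
    omega

theorem pvLoopA_full {l : List Char} (h8 : 8 ≤ l.length)
    (hall : (l.take 8).all pvIsBit = true) : pvLoopA l = some (l.take 8) := by
  cases l with
  | nil => simp at h8
  | cons c t => rw [pvLoopA]; simp only [if_pos h8, hall, if_true]

theorem pvLoopA_step {c : Char} {t : List Char} (h8 : 8 ≤ (c :: t).length)
    (hfail : ((c :: t).take 8).all pvIsBit = false) : pvLoopA (c :: t) = pvLoopA t := by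
  rw [pvLoopA]
  simp only [if_pos h8, hfail, Bool.false_eq_true, if_false]

-- A window overlapping the non-bit char `c` fails the all-0/1 test.
theorem pvTake_fail {c : Char} (t : List Char) (hc : pvIsBit c = false)
    (buf : List Char) (hlen : buf.length < 8) :
    ((buf ++ c :: t).take 8).all pvIsBit = false := by
  have h2 : 8 - buf.length = (7 - buf.length) + 1 := by omega
  rw [List.take_append, h2, List.take_succ_cons]
  simp [hc]

-- Skipping a non-bit char: every window overlapping `c` fails, and with |buf| < 8
-- no full window fits strictly inside buf; so A's scan continues after `c`.
theorem pvLoopA_skip {c : Char} (t : List Char) (hc : pvIsBit c = false) :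
    ∀ buf : List Char, buf.length < 8 → pvLoopA (buf ++ c :: t) = pvLoopA t := by
  intro buf
  induction buf with
  | nil =>
    intro _
    rw [List.nil_append]
    by_cases h8 : 8 ≤ (c :: t).length
    · rw [pvLoopA_step h8 (pvTake_fail t hc [] (by simp))]
    · rw [pvLoopA_short (by omega), pvLoopA_short (by simp at h8; omega)]
  | cons b bs ih =>
    intro hlen
    by_cases h8 : 8 ≤ (b :: (bs ++ c :: t)).length
    · rw [List.cons_append,
        pvLoopA_step h8 (by
          have := pvTake_fail t hc (b :: bs) hlen
          rwa [List.cons_append] at this),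
        ih (by simp at hlen ⊢; omega)]
    · simp only [List.length_cons, List.length_append] at h8
      rw [pvLoopA_short (by simp; omega), pvLoopA_short (by omega)]

-- Once the run in progress already holds 8 bits, B is committed: the first long run
-- starts with cur, and its first 8 chars are cur's first 8 chars.
theorem pvRuns_long (cs : List Char) :
    ∀ cur : List Char, 8 ≤ cur.length →
      pvFirstLong (pvRuns cs cur) = some (cur.take 8) := by
  induction cs with
  | nil =>
    intro cur h8
    rw [pvRuns, pvFirstLong, if_pos h8]
  | cons c t ih =>
    intro cur h8
    rw [pvRuns]
    by_cases hc : pvIsBit c = true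
    · rw [if_pos hc, ih (cur ++ [c]) (by simp; omega),
        List.take_append_of_le_length h8]
    · rw [if_neg hc, pvFirstLong, if_pos h8]

-- Invariant tying B's staged passes to A's scan: with cur the current all-bit run
-- of length < 8, B's "first long run" on the rest equals A's scan on cur ++ rest.
theorem pvRuns_eq (cs : List Char) :
    ∀ cur : List Char, cur.all pvIsBit = true → cur.length < 8 →
      pvFirstLong (pvRuns cs cur) = pvLoopA (cur ++ cs) := by
  induction cs with
  | nil =>
    intro cur _ hlen
    rw [pvRuns, pvFirstLong, if_neg (by omega), pvFirstLong,
      List.append_nil, pvLoopA_short hlen]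
  | cons c t ih =>
    intro cur hall hlen
    rw [pvRuns]
    by_cases hc : pvIsBit c = true
    · rw [if_pos hc]
      by_cases h8 : (cur ++ [c]).length = 8
      · have htake : (cur ++ c :: t).take 8 = cur ++ [c] := by
          have hsplit : cur ++ c :: t = (cur ++ [c]) ++ t := by simp
          rw [hsplit, List.take_left' h8]
        rw [pvRuns_long t (cur ++ [c]) (by omega),
          pvLoopA_full (by simp at h8 ⊢; omega)
            (by rw [htake]; simp [List.all_append, hall, hc]),
          htake, List.take_of_length_le (by omega)]
      · rw [ih (cur ++ [c]) (by simp [List.all_append, hall, hc]) (by simp at h8 ⊢; omega)]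
        congr 1
        simp
    · have hc' : pvIsBit c = false := eq_false_of_ne_true hc
      rw [if_neg hc, pvFirstLong, if_neg (by omega),
        ih [] rfl (by simp), List.nil_append, pvLoopA_skip t hc' cur hlen]

theorem pvSliceLen {cs : List Char} (h : 24 ≤ cs.length) :
    (PySem.List.slice cs (some 16) (some 24)).length = 8 := by
  simp [PySem.List.length_slice, PySem.List.clampIdx]
  omega

-- ===== VERDICT (by name: the statement is the Claim_ definition above) =====
theorem extract_status_bits_py_spec : Claim_equal_extract_status_bits_py := by
  intro resp _
  show extract_status_bits_py resp = extract_status_bits_py_alt resp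
  simp only [extract_status_bits_py, extract_status_bits_py_alt]
  rw [pvRuns_eq resp.toList [] rfl (by simp), List.nil_append]
  by_cases h24 : 24 ≤ resp.toList.length
  · by_cases hall : (PySem.List.slice resp.toList (some 16) (some 24)).all pvIsBit = true
    · rw [if_pos (And.intro h24 hall)]
      simp only [h24, if_true, pvSliceLen h24, beq_self_eq_true, Bool.true_and, hall, if_true]
    · have hall' : (PySem.List.slice resp.toList (some 16) (some 24)).all pvIsBit = false :=
        eq_false_of_ne_true hall
      simp only [h24, if_true, pvSliceLen h24, beq_self_eq_true, Bool.true_and,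
        hall', Bool.false_eq_true, if_false]
      rw [if_neg (by simp)]
  · simp only [h24, if_false]
    rw [if_neg (by simp)]
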